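-- pv_equiv track=rewrite | github.com/guoziqi1275/CSE583_final_project | scripts/transitivity.py | checkTransitivity
-- ===== SOURCE A (Python) =====
-- def createAdjList(adj_matrix):
--     """
--     Input: n x n square matrix
--     Output: Adjacency List (linked list)
--     """
--     numVerts = len(adj_matrix)
--
--     # List of empty lists
--     adj_list = [[] for _ in range(numVerts)]
--     #  # Iterate through each row in the adjacency matrix
--
--     for row in range(numVerts):
--     # Iterate through each column in the current row
--         for column in range(numVerts):
--         # If the value in the adjacency matrix is 1
--         # It means there is a path from source node to destination node
--         # Add destination node to the list of neighbors from source node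
--             if adj_matrix[row][column] == 1:
--                 adj_list[row].append(column)
--
--     return adj_list
--
-- def checkTransitivity(adj_matrix):
--     """
--     Input: n x n square matrix already checked for symmetry.
--     Output: Bool. True if matrix is transitive, false otherwise
--     """
--     adj_list = createAdjList(adj_matrix)
--
--     # get count of vertices
--     vertices = len(adj_list)
--
--     # nothing has been visited
--     visited = [-1] * vertices
--
--     for i in range (0, vertices):
--         # if this node is not visited
--         if visited[i] == -1:
--             nodes = adj_list[i]
--             sub_edges = len(nodes)
--
--             for node in nodes:
--                 if nodes != adj_list[node]:
--                     return False
--                 else: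
--                     visited[node] = 1
--
--             # mark node as visited
--             visited[i] = 1
--         else:
--             # node has already been checked no need to check again
--             continue
--
--     return True
-- ===== SOURCE B (Python) =====
-- def checkTransitivity(adj_matrix):
--     """
--     Input: n x n square matrix already checked for symmetry.
--     Output: Bool. True if matrix is transitive, false otherwise
--     """
--     n = len(adj_matrix)
--     # canonical neighbour pattern of each row (first n columns only)
--     key = [tuple(j for j in range(n) if adj_matrix[i][j] == 1) for i in range(n)]
--     # canonical integer id: index of the first row sharing the same pattern
--     rid = [key.index(k) for k in key]
--     # transitive iff every edge joins rows with the same canonical id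
--     return all(rid[j] == rid[i] for i in range(n) for j in key[i])
-- ===== Notes on version B (the rewrite author's own statement) =====
-- stated objective: alternative
-- what changed: B replaces A's visited-array loop with list-equality checks on each edge by a canonicalization pass: each row's neighbour pattern gets an integer id (index of its first occurrence), and transitivity becomes one scan comparing ids per edge.
import Mathlib
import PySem

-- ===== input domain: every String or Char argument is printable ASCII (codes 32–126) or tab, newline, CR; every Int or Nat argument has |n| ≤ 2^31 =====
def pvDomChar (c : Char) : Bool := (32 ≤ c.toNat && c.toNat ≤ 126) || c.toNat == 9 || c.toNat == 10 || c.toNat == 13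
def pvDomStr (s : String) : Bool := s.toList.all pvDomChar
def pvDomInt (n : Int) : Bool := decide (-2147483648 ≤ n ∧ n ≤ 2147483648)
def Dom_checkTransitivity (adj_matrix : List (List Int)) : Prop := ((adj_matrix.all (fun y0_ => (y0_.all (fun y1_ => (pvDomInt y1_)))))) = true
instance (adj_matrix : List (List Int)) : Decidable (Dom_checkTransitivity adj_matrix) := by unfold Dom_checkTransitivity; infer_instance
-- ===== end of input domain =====

-- B canonicalizes each row's neighbour pattern to an integer id and checks each edge by id
-- equality, instead of A's visited-array traversal comparing whole adjacency lists per edge.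
-- Pre_ excludes matrices with a row shorter than the number of rows (Python A raises IndexError).


-- ===== PORT A =====
-- adj_matrix[row][column], totalized with default 0 (Pre_ keeps the indices in range)
def pvEntry (m : List (List Int)) (i j : Nat) : Int :=
  PySem.List.pyGetD (PySem.List.pyGetD m (i : Int) []) (j : Int) 0

-- createAdjList: start from n empty lists, append column to adj_list[row] when entry = 1
def createAdjList (m : List (List Int)) : List (List Nat) :=
  let numVerts := m.length
  let init := (List.range numVerts).map (fun _ => ([] : List Nat))
  (List.range numVerts).foldl (fun al row =>
    (List.range numVerts).foldl (fun al2 column =>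
      if pvEntry m row column = 1 then al2.set row (al2.getD row [] ++ [column]) else al2) al) init

-- inner 'for node in nodes' loop: none = 'return False', some v = updated visited
def aInner (adj : List (List Nat)) (nodes : List Nat) : List Nat → List Int → Option (List Int)
  | [], v => some v
  | node :: rest, v =>
      if nodes ≠ adj.getD node [] then none
      else aInner adj nodes rest (v.set node 1)

-- outer 'for i in range(0, vertices)' loop with early return
def aLoop (adj : List (List Nat)) (vertices : Nat) (v : List Int) (i : Nat) : Bool :=
  if _h : i < vertices then
    if v.getD i (-1) = -1 then
      let nodes := adj.getD i []
      match aInner adj nodes nodes v with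
      | none => false
      | some v' => aLoop adj vertices (v'.set i 1) (i + 1)
    else aLoop adj vertices v (i + 1)
  else true
  termination_by vertices - i

def checkTransitivity (adj_matrix : List (List Int)) : Bool :=
  let adj_list := createAdjList adj_matrix
  let vertices := adj_list.length
  aLoop adj_list vertices (List.replicate vertices (-1)) 0

-- ===== PORT B =====
def checkTransitivity_alt (adj_matrix : List (List Int)) : Bool :=
  let n := adj_matrix.length
  let key := (List.range n).map (fun i => (List.range n).filter (fun j => pvEntry adj_matrix i j = 1))
  let rid := key.map (fun k => key.idxOf k)
  (List.range n).all (fun i => (key.getD i []).all (fun j => rid.getD j 0 == rid.getD i 0))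

-- ===== PRECONDITION & SPEC =====
-- Pre_ excludes exactly the inputs where Python A raises IndexError: a row shorter than the number of rows.
def Pre_checkTransitivity (adj_matrix : List (List Int)) : Prop :=
  ∀ row ∈ adj_matrix, adj_matrix.length ≤ row.length
instance (adj_matrix : List (List Int)) : Decidable (Pre_checkTransitivity adj_matrix) := by unfold Pre_checkTransitivity; infer_instance

def pvWitness_checkTransitivity : List (List Int) := [[1, 1, 0], [1, 1, 0], [0, 0, 1]]

def Spec_checkTransitivity (adj_matrix : List (List Int)) (out : Bool) : Prop := out = checkTransitivity_alt adj_matrix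
instance (adj_matrix : List (List Int)) (out : Bool) : Decidable (Spec_checkTransitivity adj_matrix out) := by unfold Spec_checkTransitivity; infer_instance

-- ===== CLAIM (what is proved, stated in full; the proofs are below) =====
def Claim_equal_checkTransitivity : Prop := ∀ (adj_matrix : List (List Int)), Dom_checkTransitivity adj_matrix → Pre_checkTransitivity adj_matrix → Spec_checkTransitivity adj_matrix (checkTransitivity adj_matrix)

-- ===== LEMMAS AND PROOFS =====

-- neighbour pattern of row i, the common characterization of both programs
def pvKey (m : List (List Int)) (i : Nat) : List Nat :=
  (List.range m.length).filter (fun j => pvEntry m i j = 1)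

-- row i is 'good': every neighbour has the same pattern
def pvGood (m : List (List Int)) (i : Nat) : Prop :=
  ∀ j ∈ pvKey m i, pvKey m j = pvKey m i

theorem pvKey_mem_lt {m : List (List Int)} {i j : Nat} (h : j ∈ pvKey m i) : j < m.length := by
  unfold pvKey at h
  have := List.mem_range.mp (List.mem_of_mem_filter h)
  exact this

theorem getD_map_range_lt {α : Type} (n i : Nat) (f : Nat → α) (d : α) (h : i < n) :
    ((List.range n).map f).getD i d = f i := by
  rw [List.getD_eq_getElem?_getD]; simp [h]

theorem getD_set_ne {α : Type} (l : List α) (i t : Nat) (d v : α) (h : t ≠ i) :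
    (l.set i v).getD t d = l.getD t d := by
  simp [List.getD_eq_getElem?_getD, List.getElem?_set_ne (Ne.symm h)]

theorem getD_set_self {α : Type} (l : List α) (i : Nat) (d v : α) (h : i < l.length) :
    (l.set i v).getD i d = v := by
  simp [List.getD_eq_getElem?_getD, h]

-- the inner column loop of createAdjList appends the filtered columns to entry `row`
theorem inner_fold_set {p : Nat → Prop} [DecidablePred p] (cs : List Nat) (al : List (List Nat))
    (row : Nat) (h : row < al.length) :
    cs.foldl (fun a c => if p c then a.set row (a.getD row [] ++ [c]) else a) al
      = al.set row (al.getD row [] ++ cs.filter (fun c => decide (p c))) := by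
  induction cs generalizing al with
  | nil => simp [List.set_getElem_self, List.getD_eq_getElem?_getD, h]
  | cons c cs ih =>
      by_cases hc : p c
      · simp only [List.foldl_cons, if_pos hc]
        rw [ih _ (by simpa using h)]
        rw [getD_set_self _ _ _ _ h, List.set_set]
        simp [hc]
      · simp only [List.foldl_cons, if_neg hc]
        rw [ih _ h]
        simp [hc]

-- after processing the first r rows, row k holds pvKey m k for k < r and [] otherwise
theorem createAdjList_partial (m : List (List Int)) (r : Nat) (hr : r ≤ m.length) :
    (List.range r).foldl (fun al row =>
      (List.range m.length).foldl (fun al2 column =>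
        if pvEntry m row column = 1 then al2.set row (al2.getD row [] ++ [column]) else al2) al)
      ((List.range m.length).map (fun _ => ([] : List Nat)))
    = (List.range m.length).map (fun k => if k < r then pvKey m k else []) := by
  induction r with
  | zero => simp
  | succ r ih =>
      rw [List.range_succ, List.foldl_append, ih (Nat.le_of_succ_le hr), List.foldl_cons,
        List.foldl_nil]
      have hlen : ((List.range m.length).map (fun k => if k < r then pvKey m k else [])).length
          = m.length := by simp
      have hrlt : r < m.length := hr
      rw [inner_fold_set (p := fun c => pvEntry m r c = 1) _ _ _ (by rw [hlen]; exact hrlt)]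
      rw [getD_map_range_lt _ _ _ _ hrlt]
      simp only [Nat.lt_irrefl, if_false, List.nil_append]
      apply List.ext_getElem
      · simp
      · intro k hk1 hk2
        simp only [List.length_set, hlen] at hk1
        by_cases hki : k = r
        · subst hki
          rw [List.getElem_set_self (by simpa [hlen] using hrlt)]
          simp [pvKey]
        · rw [List.getElem_set_ne (by omega)]
          simp only [List.getElem_map, List.getElem_range]
          have : k < r + 1 ↔ k < r := by omega
          simp [this]

theorem createAdjList_eq (m : List (List Int)) :
    createAdjList m = (List.range m.length).map (pvKey m) := by
  unfold createAdjList
  rw [createAdjList_partial m m.length (Nat.le_refl _)]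
  apply List.map_congr_left
  intro k hk
  simp [List.mem_range.mp hk]

-- aInner returns none iff some neighbour in the remaining list has a different pattern
theorem aInner_none_iff (adj : List (List Nat)) (nodes rest : List Nat) (v : List Int) :
    aInner adj nodes rest v = none ↔ ∃ j ∈ rest, adj.getD j [] ≠ nodes := by
  induction rest generalizing v with
  | nil => simp [aInner]
  | cons node rest ih =>
      by_cases h : nodes ≠ adj.getD node [] <;> simp [aInner, ih] <;> tauto

theorem aInner_length {adj : List (List Nat)} {nodes rest : List Nat} {v v' : List Int}
    (h : aInner adj nodes rest v = some v') : v'.length = v.length := by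
  induction rest generalizing v with
  | nil => simp [aInner] at h; simp [h]
  | cons node rest ih =>
      by_cases hn : nodes ≠ adj.getD node []
      · rw [aInner, if_pos hn] at h; exact absurd h (by simp)
      · rw [aInner, if_neg hn] at h
        exact (ih h).trans (by simp)

theorem aInner_getD {adj : List (List Nat)} {nodes rest : List Nat} {v v' : List Int}
    (h : aInner adj nodes rest v = some v') (t : Nat) :
    v'.getD t (-1) = v.getD t (-1) ∨ t ∈ rest := by
  induction rest generalizing v with
  | nil => simp [aInner] at h; simp [h]
  | cons node rest ih =>
      by_cases hn : nodes ≠ adj.getD node []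
      · rw [aInner, if_pos hn] at h; exact absurd h (by simp)
      · rw [aInner, if_neg hn] at h
        by_cases ht : t = node
        · right; simp [ht]
        · rcases ih h with h' | h'
          · left; rw [h', getD_set_ne _ _ _ _ _ ht]
          · right; simp [h']

-- the outer loop returns true iff every row from i on is good, under the visited invariant
theorem aLoop_iff (m : List (List Int)) (d i : Nat) (v : List Int)
    (hd : m.length - i = d) (hv : v.length = m.length)
    (hinv : ∀ t, t < m.length → v.getD t (-1) ≠ -1 → pvGood m t) :
    aLoop ((List.range m.length).map (pvKey m)) m.length v i = true
      ↔ ∀ k, i ≤ k → k < m.length → pvGood m k := by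
  induction d generalizing i v with
  | zero =>
      rw [aLoop]
      have hni : ¬ i < m.length := by omega
      simp only [hni, dif_neg, not_false_iff]
      constructor
      · intro _ k hk1 hk2; omega
      · intro _; trivial
  | succ d ih =>
      have hi : i < m.length := by omega
      rw [aLoop]
      simp only [hi, dif_pos]
      have hadj : ((List.range m.length).map (pvKey m)).getD i [] = pvKey m i :=
        getD_map_range_lt _ _ _ _ hi
      by_cases hvis : v.getD i (-1) = -1
      · simp only [hvis, if_pos, hadj]
        rcases hA : aInner ((List.range m.length).map (pvKey m)) (pvKey m i) (pvKey m i) v with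
          _ | v'
        · -- inner loop failed: row i is not good
          have ⟨j, hj1, hj2⟩ := (aInner_none_iff _ _ _ _).mp hA
          rw [getD_map_range_lt _ _ _ _ (pvKey_mem_lt hj1)] at hj2
          constructor
          · intro hfalse; exact absurd hfalse (by simp)
          · intro hall
            exact absurd (hall i (Nat.le_refl _) hi j hj1) hj2
        · -- inner loop succeeded: row i is good, neighbours marked visited are good
          have hgood : pvGood m i := by
            intro j hj
            by_contra hne
            have : aInner ((List.range m.length).map (pvKey m)) (pvKey m i) (pvKey m i) v
                = none := (aInner_none_iff _ _ _ _).mpr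
              ⟨j, hj, by rw [getD_map_range_lt _ _ _ _ (pvKey_mem_lt hj)]; exact hne⟩
            rw [hA] at this; exact absurd this (by simp)
          have hlen' : v'.length = m.length := (aInner_length hA).trans hv
          have hlen2 : (v'.set i 1).length = m.length := by simp [hlen']
          have hinv2 : ∀ t, t < m.length → (v'.set i 1).getD t (-1) ≠ -1 → pvGood m t := by
            intro t ht hne
            by_cases hti : t = i
            · subst hti; exact hgood
            · rw [getD_set_ne _ _ _ _ _ hti] at hne
              rcases aInner_getD hA t with h' | h'
              · rw [h'] at hne; exact hinv t ht hne
              · -- t is a neighbour of i, and all of i's neighbours are good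
                have hkey : pvKey m t = pvKey m i := hgood t h'
                intro j hj
                rw [hkey] at hj ⊢
                exact hgood j hj
          rw [ih (i + 1) (v'.set i 1) (by omega) hlen2 hinv2]
          constructor
          · intro hall k hk1 hk2
            rcases Nat.eq_or_lt_of_le hk1 with hk | hk
            · rw [← hk]; exact hgood
            · exact hall k hk hk2
          · intro hall k hk1 hk2; exact hall k (by omega) hk2
      · -- row i already visited: it is good by the invariant
        simp only [hvis, if_neg, not_false_iff]
        have hgood : pvGood m i := hinv i hi hvis
        rw [ih (i + 1) v (by omega) hv hinv]
        constructor
        · intro hall k hk1 hk2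
          rcases Nat.eq_or_lt_of_le hk1 with hk | hk
          · rw [← hk]; exact hgood
          · exact hall k hk hk2
        · intro hall k hk1 hk2; exact hall k (by omega) hk2

theorem portA_iff (m : List (List Int)) :
    checkTransitivity m = true ↔ ∀ k, k < m.length → pvGood m k := by
  have h0 : checkTransitivity m
      = aLoop (createAdjList m) (createAdjList m).length
          (List.replicate (createAdjList m).length (-1)) 0 := rfl
  rw [h0, createAdjList_eq]
  simp only [List.length_map, List.length_range]
  rw [aLoop_iff m (m.length - 0) 0 _ rfl (by simp)
    (by intro t ht hne; exact absurd (by simp [List.getD_eq_getElem?_getD, ht]) hne)]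
  constructor
  · intro h k hk; exact h k (Nat.zero_le _) hk
  · intro h k _ hk; exact h k hk

-- equal first-occurrence indices into the key list force equal keys
theorem idxOf_map_range_inj {α : Type} [BEq α] [LawfulBEq α] (n : Nat) (f : Nat → α) (a b : Nat)
    (ha : a < n) (hb : b < n)
    (h : ((List.range n).map f).idxOf (f a) = ((List.range n).map f).idxOf (f b)) :
    f a = f b := by
  have hma : f a ∈ (List.range n).map f := List.mem_map.mpr ⟨a, List.mem_range.mpr ha, rfl⟩
  have hmb : f b ∈ (List.range n).map f := List.mem_map.mpr ⟨b, List.mem_range.mpr hb, rfl⟩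
  have h1 := List.getElem_idxOf (List.idxOf_lt_length_of_mem hma)
  have h2 := List.getElem_idxOf (List.idxOf_lt_length_of_mem hmb)
  simp only [h] at h1
  exact h1.symm.trans h2

theorem portB_iff (m : List (List Int)) :
    checkTransitivity_alt m = true ↔ ∀ k, k < m.length → pvGood m k := by
  have h0 : checkTransitivity_alt m
      = (List.range m.length).all (fun i =>
          (((List.range m.length).map (pvKey m)).getD i []).all (fun j =>
            (((List.range m.length).map (pvKey m)).map
                (fun k => ((List.range m.length).map (pvKey m)).idxOf k)).getD j 0
              == (((List.range m.length).map (pvKey m)).map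
                (fun k => ((List.range m.length).map (pvKey m)).idxOf k)).getD i 0)) := rfl
  rw [h0, List.map_map]
  simp only [List.all_eq_true, List.mem_range, beq_iff_eq]
  constructor
  · intro h k hk j hj
    have hjlt : j < m.length := pvKey_mem_lt hj
    have h' := h k hk j (by rw [getD_map_range_lt _ _ _ _ hk]; exact hj)
    rw [getD_map_range_lt _ _ _ _ hjlt, getD_map_range_lt _ _ _ _ hk] at h'
    simp only [Function.comp_apply] at h'
    exact idxOf_map_range_inj m.length (pvKey m) j k hjlt hk h'
  · intro h i hi j hj
    rw [getD_map_range_lt _ _ _ _ hi] at hj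
    have hjlt : j < m.length := pvKey_mem_lt hj
    rw [getD_map_range_lt _ _ _ _ hjlt, getD_map_range_lt _ _ _ _ hi]
    simp only [Function.comp_apply]
    rw [h i hi j hj]

-- ===== VERDICT (by name: the statement is the Claim_ definition above) =====
theorem checkTransitivity_spec : Claim_equal_checkTransitivity := by
  intro m _ _
  unfold Spec_checkTransitivity
  have hA := portA_iff m
  have hB := portB_iff m
  by_cases hP : ∀ k, k < m.length → pvGood m k
  · rw [hA.mpr hP, hB.mpr hP]
  · rw [eq_false_of_ne_true (fun h => hP (hA.mp h)),
      eq_false_of_ne_true (fun h => hP (hB.mp h))]
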